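-- pv_equiv track=rewrite | github.com/edubarr/syngenta-python-hotel-reservation-test | src/my_module.py | get_cheapest_quotes
-- ===== SOURCE A (Python) =====
-- def get_hotel_info(hotel_name):
--     '''Takes a string with the hotel name, and returns all the info about the hotel (rating and price rates).'''
--
--     #Dict of hotel infos
--     hotel_info = {
--         "Lakewood": {
--             "rating": 3,
--             "regular": {"week": 110, "weekend": 90},
--             "reward": {"week": 80, "weekend": 80},
--         },
--         "Bridgewood": {
--             "rating": 4,
--             "regular": {"week": 160, "weekend": 60},
--             "reward": {"week": 110, "weekend": 50},
--         },
--         "Ridgewood": {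
--             "rating": 5,
--             "regular": {"week": 220, "weekend": 150},
--             "reward": {"week": 100, "weekend": 40},
--         },
--     }
--     return hotel_info[hotel_name]
--
-- def get_cheapest_quotes(week_days, client_type):
--     '''Takes a list of week (and weekend) days and the type of the client and return a list of cheapest hotels (one or more)'''
--
--     hotels = ["Lakewood", "Bridgewood", "Ridgewood"]
--
--     hotels_quotes = {}
--
--     # Loop through all hotels for every day of the list and saves the total quote on the hotels_quotes dict
--     for hotel in hotels:
--         hotels_quotes[hotel] = 0
--         hotel_rates = get_hotel_info(hotel)
--         for day in week_days:
--             if day in ["sat", "sun"]: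
--                 hotels_quotes[hotel] += hotel_rates[client_type]["weekend"]
--             else:
--                 hotels_quotes[hotel] += hotel_rates[client_type]["week"]
--
--     # Chooses the cheapest hotels on the dict and return a list
--     cheapest_quote = min(hotels_quotes.values())
--     cheapest_hotels = [hotel for hotel in hotels_quotes.keys() if hotels_quotes[hotel] == cheapest_quote]
--
--     return cheapest_hotels
-- ===== SOURCE B (Python) =====
-- # Count weekend days once, then compute each hotel's total in closed form.
--
-- RATES = {
--     "Lakewood":   {"regular": (110, 90),  "reward": (80, 80)},
--     "Bridgewood": {"regular": (160, 60),  "reward": (110, 50)},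
--     "Ridgewood":  {"regular": (220, 150), "reward": (100, 40)},
-- }
--
-- def get_cheapest_quotes(week_days, client_type):
--     weekend = sum(1 for d in week_days if d in ("sat", "sun"))
--     weekday = len(week_days) - weekend
--     hotels = ["Lakewood", "Bridgewood", "Ridgewood"]
--     totals = []
--     for h in hotels:
--         wk, we = RATES[h][client_type]
--         totals.append(weekday * wk + weekend * we)
--     m = min(totals)
--     return [h for h, t in zip(hotels, totals) if t == m]
-- ===== Notes on version B (the rewrite author's own statement) =====
-- stated objective: simpler
-- what changed: Instead of accumulating a per-hotel quote day by day in a dict, B counts the weekend days once and computes each hotel's total in closed form; Pre_ excludes invalid client types, on which A raises KeyError whenever any day is present and only returns (all hotels at 0) for an empty day list by accident of looking rates up inside the day loop, while B always looks the rate up and raises there.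
-- outside the precondition, e.g. on get_cheapest_quotes([], 'vip'): A returns ['Lakewood', 'Bridgewood', 'Ridgewood'], B raises KeyError
import Mathlib
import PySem

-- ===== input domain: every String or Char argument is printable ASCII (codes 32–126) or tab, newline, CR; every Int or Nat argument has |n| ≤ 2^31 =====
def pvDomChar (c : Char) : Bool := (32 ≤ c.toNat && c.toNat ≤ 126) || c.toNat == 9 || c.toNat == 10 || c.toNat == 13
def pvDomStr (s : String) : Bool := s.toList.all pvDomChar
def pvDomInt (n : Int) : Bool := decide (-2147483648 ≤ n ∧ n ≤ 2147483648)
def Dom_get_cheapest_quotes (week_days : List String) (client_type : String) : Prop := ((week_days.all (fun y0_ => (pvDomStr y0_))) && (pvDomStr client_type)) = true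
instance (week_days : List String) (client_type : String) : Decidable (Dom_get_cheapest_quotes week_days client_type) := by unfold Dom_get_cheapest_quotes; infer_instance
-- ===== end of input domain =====

-- B replaces A's per-day dict accumulation with one weekend count and a closed-form
-- total per hotel (simpler); A = B on Pre_ (valid client types; outside it B raises).


-- ===== PORT A =====
-- The "rating" entry of each hotel's info dict is never read by get_cheapest_quotes and
-- the Python value dict is heterogeneous, so only the two rate dicts are ported; the
-- hotel_info lookup (A only performs it on the three listed names) uses getD with an
-- empty-dict default that is never reached.
def get_hotel_info (hotel_name : String) : PySem.Dict String (PySem.Dict String Int) :=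
  let hotel_info : PySem.Dict String (PySem.Dict String (PySem.Dict String Int)) :=
    PySem.Dict.ofList [
      ("Lakewood", PySem.Dict.ofList [
        ("regular", PySem.Dict.ofList [("week", 110), ("weekend", 90)]),
        ("reward", PySem.Dict.ofList [("week", 80), ("weekend", 80)])]),
      ("Bridgewood", PySem.Dict.ofList [
        ("regular", PySem.Dict.ofList [("week", 160), ("weekend", 60)]),
        ("reward", PySem.Dict.ofList [("week", 110), ("weekend", 50)])]),
      ("Ridgewood", PySem.Dict.ofList [
        ("regular", PySem.Dict.ofList [("week", 220), ("weekend", 150)]),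
        ("reward", PySem.Dict.ofList [("week", 100), ("weekend", 40)])])]
  hotel_info.getD hotel_name PySem.Dict.empty

-- hotel_rates[client_type] raises KeyError in Python for a client_type other than
-- "regular"/"reward" (reached only when week_days is nonempty); those inputs are
-- excluded by Pre_ below, so the getD default is never reached inside Pre_.
def get_cheapest_quotes (week_days : List String) (client_type : String) : List String :=
  let hotels := ["Lakewood", "Bridgewood", "Ridgewood"]
  let hotels_quotes : PySem.Dict String Int :=
    hotels.foldl (fun q hotel =>
      let q := q.insert hotel 0
      let hotel_rates := get_hotel_info hotel
      week_days.foldl (fun q day =>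
        if day == "sat" || day == "sun" then
          q.modify hotel 0 (fun x => x + (hotel_rates.getD client_type PySem.Dict.empty).getD "weekend" 0)
        else
          q.modify hotel 0 (fun x => x + (hotel_rates.getD client_type PySem.Dict.empty).getD "week" 0)) q
      ) PySem.Dict.empty
  let cheapest_quote := (PySem.List.min? hotels_quotes.values (fun x => x)).getD 0
  hotels_quotes.keys.filter (fun hotel => hotels_quotes.getD hotel 0 == cheapest_quote)

-- ===== PORT B =====
def pv_rates : PySem.Dict String (PySem.Dict String (Int × Int)) :=
  PySem.Dict.ofList [
    ("Lakewood",   PySem.Dict.ofList [("regular", (110, 90)),  ("reward", (80, 80))]),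
    ("Bridgewood", PySem.Dict.ofList [("regular", (160, 60)),  ("reward", (110, 50))]),
    ("Ridgewood",  PySem.Dict.ofList [("regular", (220, 150)), ("reward", (100, 40))])]

-- RATES[h][client_type] raises KeyError in Python for an invalid client_type;
-- excluded by Pre_, so the getD defaults are unreached inside Pre_.
def get_cheapest_quotes_alt (week_days : List String) (client_type : String) : List String :=
  let weekend : Int := (week_days.countP (fun d => d == "sat" || d == "sun") : Int)
  let weekday : Int := (week_days.length : Int) - weekend
  let hotels := ["Lakewood", "Bridgewood", "Ridgewood"]
  let totals : List Int := hotels.map (fun h =>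
    let r := (pv_rates.getD h PySem.Dict.empty).getD client_type ((0 : Int), (0 : Int))
    weekday * r.1 + weekend * r.2)
  let m := (PySem.List.min? totals (fun x => x)).getD 0
  ((hotels.zip totals).filter (fun p => p.2 == m)).map (fun p => p.1)

-- ===== PRECONDITION & SPEC =====
-- Pre_ admits exactly the valid client types. Outside it, A raises KeyError whenever
-- any day is present, and for an empty day list A only returns all hotels at 0 by
-- accident of looking the rates up inside the day loop; B's rate lookup raises there.
def Pre_get_cheapest_quotes (week_days : List String) (client_type : String) : Prop :=
  client_type = "regular" ∨ client_type = "reward"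
instance (week_days : List String) (client_type : String) : Decidable (Pre_get_cheapest_quotes week_days client_type) := by unfold Pre_get_cheapest_quotes; infer_instance
def pvWitness_get_cheapest_quotes : List String × String := (["mon", "sat", "sun"], "regular")

def Spec_get_cheapest_quotes (week_days : List String) (client_type : String) (out : List String) : Prop := out = get_cheapest_quotes_alt week_days client_type
instance (week_days : List String) (client_type : String) (out : List String) : Decidable (Spec_get_cheapest_quotes week_days client_type out) := by unfold Spec_get_cheapest_quotes; infer_instance

-- ===== CLAIM (what is proved, stated in full; the proofs are below) =====
def Claim_equal_get_cheapest_quotes : Prop := ∀ (week_days : List String) (client_type : String), Dom_get_cheapest_quotes week_days client_type → Pre_get_cheapest_quotes week_days client_type → Spec_get_cheapest_quotes week_days client_type (get_cheapest_quotes week_days client_type)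

-- ===== LEMMAS AND PROOFS =====

-- a branch on the day type outside the modify is a single modify with the branch inside
lemma step_eq (c : Bool) (q : PySem.Dict String Int) (k : String) (A B : Int) :
    (if c = true then q.modify k 0 (fun x => x + A) else q.modify k 0 (fun x => x + B))
      = q.modify k 0 (fun x => x + (if c then A else B)) := by cases c <;> simp

-- A's inner per-day loop only changes the entry at its hotel's key, by the sum of the day rates
lemma getD_fold_modify (days : List String) (f : String → Int) (k k' : String) (q : PySem.Dict String Int) :
    (days.foldl (fun q d => q.modify k 0 (fun x => x + f d)) q).getD k' 0
      = q.getD k' 0 + (if k' = k then (days.map f).sum else 0) := by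
  induction days generalizing q with
  | nil => simp
  | cons d t ih =>
    simp only [List.foldl_cons, List.map_cons, List.sum_cons, ih, PySem.Dict.getD_modify]
    split_ifs with h
    · rw [h]; ring
    · ring

-- and it keeps the key set unchanged
lemma keys_fold_modify (days : List String) (g : String → Int → Int) (k : String) (q : PySem.Dict String Int)
    (hk : q.contains k = true) :
    (days.foldl (fun q d => q.modify k 0 (g d)) q).keys = q.keys := by
  induction days generalizing q with
  | nil => rfl
  | cons d t ih =>
    simp only [List.foldl_cons]
    rw [ih _ (by simp [PySem.Dict.contains_modify, hk]),
      PySem.Dict.keys_modify, PySem.Dict.keys_insert_of_contains _ _ hk]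

-- A's day-by-day sum in closed form: weekday_count * week_rate + weekend_count * weekend_rate
lemma sum_rate (days : List String) (wk we : Int) :
    (days.map (fun d => if d == "sat" || d == "sun" then we else wk)).sum
      = ((days.length : Int) - (days.countP (fun d => d == "sat" || d == "sun") : Int)) * wk
        + (days.countP (fun d => d == "sat" || d == "sun") : Int) * we := by
  induction days with
  | nil => simp
  | cons d t ih =>
    simp only [List.map_cons, List.sum_cons, List.countP_cons, List.length_cons, ih]
    split_ifs with h <;> push_cast <;> ring

-- the per-day rate A adds for a given hotel and client type
def pv_dayrate (hotel : String) (ct : String) (day : String) : Int :=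
  if day == "sat" || day == "sun" then
    ((get_hotel_info hotel).getD ct PySem.Dict.empty).getD "weekend" 0
  else ((get_hotel_info hotel).getD ct PySem.Dict.empty).getD "week" 0

-- the three stages of A's quotes dict, named so the characterization lemmas stay readable
def pvD1 (wd : List String) (fL : String → Int) : PySem.Dict String Int :=
  wd.foldl (fun q d => q.modify "Lakewood" 0 (fun x => x + fL d)) (PySem.Dict.empty.insert "Lakewood" 0)
def pvD2 (wd : List String) (fL fB : String → Int) : PySem.Dict String Int :=
  wd.foldl (fun q d => q.modify "Bridgewood" 0 (fun x => x + fB d)) ((pvD1 wd fL).insert "Bridgewood" 0)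
def pvD3 (wd : List String) (fL fB fR : String → Int) : PySem.Dict String Int :=
  wd.foldl (fun q d => q.modify "Ridgewood" 0 (fun x => x + fR d)) ((pvD2 wd fL fB).insert "Ridgewood" 0)

-- A's port, rephrased over the named dict pvD3 (definitional: folds and branches unchanged)
lemma A_eq (wd : List String) (ct : String) :
    get_cheapest_quotes wd ct =
      (pvD3 wd (pv_dayrate "Lakewood" ct) (pv_dayrate "Bridgewood" ct) (pv_dayrate "Ridgewood" ct)).keys.filter
        (fun h => (pvD3 wd (pv_dayrate "Lakewood" ct) (pv_dayrate "Bridgewood" ct) (pv_dayrate "Ridgewood" ct)).getD h 0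
          == (PySem.List.min? (pvD3 wd (pv_dayrate "Lakewood" ct) (pv_dayrate "Bridgewood" ct) (pv_dayrate "Ridgewood" ct)).values (fun x => x)).getD 0) := by
  simp only [get_cheapest_quotes, pvD3, pvD2, pvD1, pv_dayrate, List.foldl_cons, List.foldl_nil, step_eq]

lemma keys_pvD3 (wd : List String) (fL fB fR : String → Int) :
    (pvD3 wd fL fB fR).keys = ["Lakewood", "Bridgewood", "Ridgewood"] := by
  have hc1 : (PySem.Dict.empty.insert "Lakewood" (0:Int)).contains "Lakewood" = true :=
    PySem.Dict.contains_insert_self _ _ _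
  have hk1 : (pvD1 wd fL).keys = ["Lakewood"] := by
    rw [pvD1, keys_fold_modify _ _ _ _ hc1]; decide
  have hcB : (pvD1 wd fL).contains "Bridgewood" = false := by
    rw [PySem.Dict.contains_eq_decide_mem_keys, hk1]; decide
  have hc2 : ((pvD1 wd fL).insert "Bridgewood" (0:Int)).contains "Bridgewood" = true :=
    PySem.Dict.contains_insert_self _ _ _
  have hk2 : (pvD2 wd fL fB).keys = ["Lakewood", "Bridgewood"] := by
    rw [pvD2, keys_fold_modify _ _ _ _ hc2, PySem.Dict.keys_insert_of_not_contains _ _ hcB, hk1]; rfl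
  have hcR : (pvD2 wd fL fB).contains "Ridgewood" = false := by
    rw [PySem.Dict.contains_eq_decide_mem_keys, hk2]; decide
  have hc3 : ((pvD2 wd fL fB).insert "Ridgewood" (0:Int)).contains "Ridgewood" = true :=
    PySem.Dict.contains_insert_self _ _ _
  rw [pvD3, keys_fold_modify _ _ _ _ hc3, PySem.Dict.keys_insert_of_not_contains _ _ hcR, hk2]; rfl

lemma getD_pvD3 (wd : List String) (fL fB fR : String → Int) (k : String) :
    (pvD3 wd fL fB fR).getD k 0 =
      (if k = "Lakewood" then (wd.map fL).sum else 0)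
      + (if k = "Bridgewood" then (wd.map fB).sum else 0)
      + (if k = "Ridgewood" then (wd.map fR).sum else 0) := by
  simp only [pvD3, pvD2, pvD1, getD_fold_modify, PySem.Dict.getD_insert, PySem.Dict.getD_empty]
  split_ifs <;> simp_all

lemma values_pvD3 (wd : List String) (fL fB fR : String → Int) :
    (pvD3 wd fL fB fR).values = [(wd.map fL).sum, (wd.map fB).sum, (wd.map fR).sum] := by
  rw [PySem.Dict.values_eq_map_keys _ (by rw [keys_pvD3]; decide) 0, keys_pvD3]
  simp [getD_pvD3]

lemma sum_dayrate (wd : List String) (h ct : String) :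
    (wd.map (pv_dayrate h ct)).sum =
      ((wd.length : Int) - (wd.countP (fun d => d == "sat" || d == "sun") : Int))
          * ((get_hotel_info h).getD ct PySem.Dict.empty).getD "week" 0
        + (wd.countP (fun d => d == "sat" || d == "sun") : Int)
          * ((get_hotel_info h).getD ct PySem.Dict.empty).getD "weekend" 0 :=
  sum_rate wd _ _

-- both ports end as the same selection among three totals
lemma final3 (t1 t2 t3 m : Int) :
    (if t1 = m then
      "Lakewood" ::
        (if t2 = m then "Bridgewood" :: (if t3 = m then ["Ridgewood"] else [])
         else if t3 = m then ["Ridgewood"] else [])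
     else if t2 = m then "Bridgewood" :: (if t3 = m then ["Ridgewood"] else [])
     else if t3 = m then ["Ridgewood"] else [])
    = List.map (fun p => p.1)
        (if t1 = m then
          ("Lakewood", t1) ::
            (if t2 = m then ("Bridgewood", t2) :: (if t3 = m then [("Ridgewood", t3)] else [])
             else if t3 = m then [("Ridgewood", t3)] else [])
         else if t2 = m then ("Bridgewood", t2) :: (if t3 = m then [("Ridgewood", t3)] else [])
         else if t3 = m then [("Ridgewood", t3)] else []) := by
  split_ifs <;> rfl

-- ===== VERDICT (by name: the statement is the Claim_ definition above) =====
theorem get_cheapest_quotes_spec : Claim_equal_get_cheapest_quotes := by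
  intro wd ct _hdom hpre
  unfold Spec_get_cheapest_quotes
  rcases hpre with h | h <;> subst h
  · rw [A_eq, keys_pvD3, values_pvD3]
    simp only [getD_pvD3, sum_dayrate, get_cheapest_quotes_alt,
      show ((get_hotel_info "Lakewood").getD "regular" PySem.Dict.empty).getD "week" 0 = 110 from rfl,
      show ((get_hotel_info "Lakewood").getD "regular" PySem.Dict.empty).getD "weekend" 0 = 90 from rfl,
      show ((get_hotel_info "Bridgewood").getD "regular" PySem.Dict.empty).getD "week" 0 = 160 from rfl,
      show ((get_hotel_info "Bridgewood").getD "regular" PySem.Dict.empty).getD "weekend" 0 = 60 from rfl,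
      show ((get_hotel_info "Ridgewood").getD "regular" PySem.Dict.empty).getD "week" 0 = 220 from rfl,
      show ((get_hotel_info "Ridgewood").getD "regular" PySem.Dict.empty).getD "weekend" 0 = 150 from rfl,
      show (pv_rates.getD "Lakewood" PySem.Dict.empty).getD "regular" ((0:Int),(0:Int)) = (110, 90) from rfl,
      show (pv_rates.getD "Bridgewood" PySem.Dict.empty).getD "regular" ((0:Int),(0:Int)) = (160, 60) from rfl,
      show (pv_rates.getD "Ridgewood" PySem.Dict.empty).getD "regular" ((0:Int),(0:Int)) = (220, 150) from rfl,
      List.map_cons, List.map_nil, List.zip_cons_cons, List.zip_nil_right,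
      List.filter_cons, List.filter_nil, beq_iff_eq, String.reduceEq, reduceIte, add_zero, zero_add]
    exact final3 _ _ _ _
  · rw [A_eq, keys_pvD3, values_pvD3]
    simp only [getD_pvD3, sum_dayrate, get_cheapest_quotes_alt,
      show ((get_hotel_info "Lakewood").getD "reward" PySem.Dict.empty).getD "week" 0 = 80 from rfl,
      show ((get_hotel_info "Lakewood").getD "reward" PySem.Dict.empty).getD "weekend" 0 = 80 from rfl,
      show ((get_hotel_info "Bridgewood").getD "reward" PySem.Dict.empty).getD "week" 0 = 110 from rfl,
      show ((get_hotel_info "Bridgewood").getD "reward" PySem.Dict.empty).getD "weekend" 0 = 50 from rfl,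
      show ((get_hotel_info "Ridgewood").getD "reward" PySem.Dict.empty).getD "week" 0 = 100 from rfl,
      show ((get_hotel_info "Ridgewood").getD "reward" PySem.Dict.empty).getD "weekend" 0 = 40 from rfl,
      show (pv_rates.getD "Lakewood" PySem.Dict.empty).getD "reward" ((0:Int),(0:Int)) = (80, 80) from rfl,
      show (pv_rates.getD "Bridgewood" PySem.Dict.empty).getD "reward" ((0:Int),(0:Int)) = (110, 50) from rfl,
      show (pv_rates.getD "Ridgewood" PySem.Dict.empty).getD "reward" ((0:Int),(0:Int)) = (100, 40) from rfl,
      List.map_cons, List.map_nil, List.zip_cons_cons, List.zip_nil_right,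
      List.filter_cons, List.filter_nil, beq_iff_eq, String.reduceEq, reduceIte, add_zero, zero_add]
    exact final3 _ _ _ _
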